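-- pv_equiv track=rewrite | github.com/SiroBrt/literate-giggle | formas_cuadradas/circulo.py | coordenadas
-- ===== SOURCE A (Python) =====
-- import math
--
-- def coordenadas(r):
--     x = 0
--     y = math.floor(r)
--     r2 = r**2
--     result = []
--     while x <= y:
--         result.append([x, y])
--         x += 1
--         if x**2 + y**2 > r2:
--             y -= 1
--     return result
-- ===== SOURCE B (Python) =====
-- import math
--
--
-- def coordenadas(r):
--     if r < 0:
--         return []
--     r2 = r * r
--     n = math.isqrt(r2 // 2)
--     return [[x, math.isqrt(r2 - x * x)] for x in range(n + 1)]
-- ===== Notes on version B (the rewrite author's own statement) =====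
-- stated objective: alternative
-- what changed: Replaced the incremental midpoint-style loop (mutable y with a conditional decrement per step) by a closed-form comprehension: the octant length is isqrt(r^2//2)+1 and each y is computed directly as isqrt(r^2-x^2).
import Mathlib
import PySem

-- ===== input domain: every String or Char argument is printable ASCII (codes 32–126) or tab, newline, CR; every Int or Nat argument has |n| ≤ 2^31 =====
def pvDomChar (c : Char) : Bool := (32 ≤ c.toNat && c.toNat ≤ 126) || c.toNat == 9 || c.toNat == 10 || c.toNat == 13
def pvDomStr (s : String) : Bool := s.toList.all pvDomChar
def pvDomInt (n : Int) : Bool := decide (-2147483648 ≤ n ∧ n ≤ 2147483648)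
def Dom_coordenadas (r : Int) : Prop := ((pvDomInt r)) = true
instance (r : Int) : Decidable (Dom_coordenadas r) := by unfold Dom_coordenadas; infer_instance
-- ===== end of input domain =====

-- B replaces A's incremental decision loop by a closed-form comprehension (per-point integer sqrt); same cost, different decomposition.

-- ===== PORT A =====
-- the while loop of A: x counts up, y is conditionally decremented; measure y - x decreases
def coordLoopA (r2 x y : Int) : List (List Int) :=
  if _h : x ≤ y then
    [x, y] :: coordLoopA r2 (x + 1) (if (x + 1) ^ 2 + y ^ 2 > r2 then y - 1 else y)
  else []
termination_by (y - x + 1).toNat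
decreasing_by
  split <;> omega

def coordenadas (r : Int) : List (List Int) :=
  -- x = 0; y = math.floor(r) = r on Int; r2 = r ** 2
  coordLoopA (r ^ 2) 0 r

-- ===== PORT B =====
-- math.isqrt on a nonnegative Int operand
def isqrtI (n : Int) : Int := (Nat.sqrt n.toNat : Nat)

def coordenadas_alt (r : Int) : List (List Int) :=
  if r < 0 then []
  else
    (PySem.List.pyRange 0 (isqrtI (PySem.Int.floordiv (r * r) 2) + 1) 1).map
      (fun x => [x, isqrtI (r * r - x * x)])

-- ===== PRECONDITION & SPEC =====
def Spec_coordenadas (r : Int) (out : List (List Int)) : Prop := out = coordenadas_alt r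
instance (r : Int) (out : List (List Int)) : Decidable (Spec_coordenadas r out) := by unfold Spec_coordenadas; infer_instance

-- ===== CLAIM (what is proved, stated in full; the proofs are below) =====
def Claim_equal_coordenadas : Prop := ∀ (r : Int), Dom_coordenadas r → Spec_coordenadas r (coordenadas r)

-- ===== LEMMAS AND PROOFS =====

-- characterisation of isqrtI on nonnegative inputs
theorem isqrtI_spec (n : Int) (hn : 0 ≤ n) :
    isqrtI n ^ 2 ≤ n ∧ n < (isqrtI n + 1) ^ 2 := by
  unfold isqrtI
  constructor
  · have h1 : ((Nat.sqrt n.toNat ^ 2 : Nat) : Int) ≤ ((n.toNat : Nat) : Int) :=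
      Int.ofNat_le.mpr (Nat.sqrt_le' n.toNat)
    push_cast at h1
    rw [Int.toNat_of_nonneg hn] at h1
    exact h1
  · have h2 : ((n.toNat : Nat) : Int) < ((Nat.sqrt n.toNat + 1) ^ 2 : Nat) :=
      Int.ofNat_lt.mpr (Nat.lt_succ_sqrt' n.toNat)
    push_cast at h2
    rw [Int.toNat_of_nonneg hn] at h2
    exact h2

theorem isqrtI_nonneg (n : Int) : 0 ≤ isqrtI n := by
  unfold isqrtI; positivity

theorem isqrtI_unique (n y : Int) (hy : 0 ≤ y) (h1 : y ^ 2 ≤ n) (h2 : n < (y + 1) ^ 2) :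
    isqrtI n = y := by
  have hn : 0 ≤ n := le_trans (by positivity) h1
  obtain ⟨s1, s2⟩ := isqrtI_spec n hn
  have hs : 0 ≤ isqrtI n := isqrtI_nonneg n
  nlinarith [sq_nonneg (isqrtI n - y), sq_nonneg (isqrtI n + y)]

-- x ≤ isqrt(r2 // 2)  ↔  2 x² ≤ r2  (for 0 ≤ x, 0 ≤ r2)
theorem le_bound_iff (r2 x : Int) (hx : 0 ≤ x) (hr2 : 0 ≤ r2) :
    x ≤ isqrtI (PySem.Int.floordiv r2 2) ↔ 2 * x ^ 2 ≤ r2 := by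
  rw [PySem.Int.floordiv_eq_ediv_of_pos (show (0:Int) < 2 by omega)]
  have hfd0 : (0:Int) ≤ r2 / 2 := by omega
  obtain ⟨s1, s2⟩ := isqrtI_spec (r2 / 2) hfd0
  have hs : 0 ≤ isqrtI (r2 / 2) := isqrtI_nonneg _
  constructor
  · intro h
    have hxs : x ^ 2 ≤ isqrtI (r2 / 2) ^ 2 := by nlinarith
    have : x ^ 2 ≤ r2 / 2 := le_trans hxs s1
    omega
  · intro h
    have hx2 : x ^ 2 ≤ r2 / 2 := by omega
    by_contra hlt
    have hlt' : isqrtI (r2 / 2) + 1 ≤ x := by omega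
    have : (isqrtI (r2 / 2) + 1) ^ 2 ≤ x ^ 2 := by nlinarith
    omega

-- under the bracket/invariant hypotheses, 2x² > r2 when the loop has stopped (y < x)
theorem stop_bound (r2 x y : Int) (hy : -1 ≤ y) (hyx : y < x)
    (h2 : r2 < (y + 1) ^ 2 + x ^ 2) : ¬ 2 * x ^ 2 ≤ r2 := by
  have hxy1 : (0:Int) ≤ x - (y + 1) := by omega
  have hxy2 : (0:Int) ≤ x + y + 1 := by omega
  nlinarith [mul_nonneg hxy1 hxy2]

-- main loop invariant: if y = isqrt(r2 - x²) exactly (bracket hypotheses), the loop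
-- produces exactly the mapped range up to isqrt(r2 // 2)
theorem loopA_eq (k : Nat) : ∀ (r2 x y : Int), (y - x + 1).toNat ≤ k → 0 ≤ x → -1 ≤ y →
    y ^ 2 + x ^ 2 ≤ r2 → r2 < (y + 1) ^ 2 + x ^ 2 →
    coordLoopA r2 x y =
      (PySem.List.pyRange x (isqrtI (PySem.Int.floordiv r2 2) + 1) 1).map
        (fun x => [x, isqrtI (r2 - x * x)]) := by
  induction k with
  | zero =>
    intro r2 x y hk hx hy h1 h2
    have hyx : y < x := by omega
    have hr2 : 0 ≤ r2 := by nlinarith [sq_nonneg y, sq_nonneg x]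
    rw [coordLoopA, dif_neg (by omega)]
    rw [PySem.List.pyRange_one_eq_nil ?_, List.map_nil]
    have hnb := (not_iff_not.mpr (le_bound_iff r2 x hx hr2)).mpr (stop_bound r2 x y hy hyx h2)
    omega
  | succ k ih =>
    intro r2 x y hk hx hy h1 h2
    have hr2 : 0 ≤ r2 := by nlinarith [sq_nonneg y, sq_nonneg x]
    rw [coordLoopA]
    by_cases hxy : x ≤ y
    · rw [dif_pos hxy]
      have hybnd : 2 * x ^ 2 ≤ r2 := by nlinarith
      have hxle : x ≤ isqrtI (PySem.Int.floordiv r2 2) := (le_bound_iff r2 x hx hr2).mpr hybnd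
      rw [PySem.List.pyRange_one_cons (by omega), List.map_cons]
      have hyval : isqrtI (r2 - x * x) = y := by
        apply isqrtI_unique _ _ (by omega) (by nlinarith) (by nlinarith)
      rw [hyval]
      congr 1
      by_cases hend : x = y
      · -- last point of the octant: the recursive call and the remaining range are both empty
        have hy'le : (if (x + 1) ^ 2 + y ^ 2 > r2 then y - 1 else y) ≤ y := by split <;> omega
        rw [coordLoopA, dif_neg (by omega)]
        rw [PySem.List.pyRange_one_eq_nil ?_, List.map_nil]
        have hstop : ¬ 2 * (x + 1) ^ 2 ≤ r2 := by
          subst hend; nlinarith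
        have hnb := (not_iff_not.mpr (le_bound_iff r2 (x + 1) (by omega) hr2)).mpr hstop
        omega
      · -- x < y: the invariant carries to (x+1, y')
        have hxlty : x < y := lt_of_le_of_ne hxy hend
        apply ih r2 (x + 1) _ ?_ (by omega) ?_ ?_ ?_
        · split <;> omega
        · split <;> omega
        · split
          · next h => nlinarith
          · next h => rw [not_lt] at h; nlinarith
        · split
          · next h => nlinarith
          · next h => nlinarith
    · rw [dif_neg hxy]
      rw [PySem.List.pyRange_one_eq_nil ?_, List.map_nil]
      have hnb := (not_iff_not.mpr (le_bound_iff r2 x hx hr2)).mpr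
        (stop_bound r2 x y hy (by omega) h2)
      omega

-- ===== VERDICT (by name: the statement is the Claim_ definition above) =====
theorem coordenadas_spec : Claim_equal_coordenadas := by
  intro r _
  unfold Spec_coordenadas coordenadas coordenadas_alt
  by_cases hr : r < 0
  · rw [if_pos hr, coordLoopA, dif_neg (by omega)]
  · rw [if_neg hr]
    rw [not_lt] at hr
    have hsq : r ^ 2 = r * r := sq r
    rw [hsq]
    exact loopA_eq ((r - 0 + 1).toNat) (r * r) 0 r (le_refl _) (le_refl _) (by omega)
      (by nlinarith) (by nlinarith)
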